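-- pv_equiv track=rewrite | github.com/jkim1626/Rice-Python | module3/hw/iterations.py | rotate_smallest
-- ===== SOURCE A (Python) =====
-- def rotate_smallest(list):
--     # Get the smallest number in the list
--     smallest = list[0]
--     for i in range(len(list)):
--         if list[i] < smallest:
--             smallest = list[i]
--
--     for j in range(len(list)):
--         if list[0] == smallest:
--             break
--         else:
--             temp = list[0]
--             for s in range(len(list) -1):
--                 list[s] = list[s + 1]
--             list[len(list) - 1] = temp
--     return list
-- ===== SOURCE B (Python) =====
-- def rotate_smallest(list):
--     # single pass: index of first minimum, then one slice-based rotation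
--     i = list.index(min(list))
--     return list[i:] + list[:i]
-- ===== Notes on version B (the rewrite author's own statement) =====
-- stated objective: faster
-- what changed: Instead of repeatedly rotating the list left by one element (quadratic shifting) until the minimum reaches the front, B finds the index of the first minimum and performs a single slice-based rotation; note A mutates its argument in place while B builds a new list (equivalence is about the return value).
import Mathlib
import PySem

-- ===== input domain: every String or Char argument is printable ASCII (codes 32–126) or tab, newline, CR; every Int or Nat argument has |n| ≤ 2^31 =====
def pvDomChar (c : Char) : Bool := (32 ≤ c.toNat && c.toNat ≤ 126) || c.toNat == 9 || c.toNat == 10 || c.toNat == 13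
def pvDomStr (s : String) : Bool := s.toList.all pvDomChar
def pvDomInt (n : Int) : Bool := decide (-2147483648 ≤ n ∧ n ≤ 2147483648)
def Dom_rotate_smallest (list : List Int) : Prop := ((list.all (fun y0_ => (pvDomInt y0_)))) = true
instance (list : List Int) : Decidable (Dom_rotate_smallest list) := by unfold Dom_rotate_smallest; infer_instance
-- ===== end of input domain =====

-- B replaces A's repeated rotate-by-one loop (quadratic shifting) with a single slice rotation at the
-- first minimum's index (linear). A mutates its argument in place; B does not — the equivalence proved
-- here is about the RETURN value only.

-- ===== PORT A =====
-- inner loop: for s in range(len(list)-1): list[s] = list[s+1]; then list[len(list)-1] = temp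
def shiftA (l : List Int) : List Int :=
  match PySem.List.pyGet? l 0 with
  | none => l      -- unreachable: shiftA is only called on nonempty lists
  | some temp =>
    let l' := (PySem.List.pyRange 0 ((l.length : Int) - 1) 1).foldl
      (fun acc s => PySem.List.pySetD acc s (PySem.List.pyGetD acc (s + 1) 0)) l
    PySem.List.pySetD l' ((l.length : Int) - 1) temp

-- outer loop: for j in range(len(list)): if list[0] == smallest: break else <shift>
def rotateLoopA : Nat → Int → List Int → List Int
  | 0, _, l => l
  | j + 1, sm, l =>
    if PySem.List.pyGet? l 0 = some sm then l else rotateLoopA j sm (shiftA l)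

def rotate_smallest (list : List Int) : List Int :=
  match PySem.List.pyGet? list 0 with
  | none => []     -- IndexError on the empty list; excluded by Pre_
  | some h =>
    let smallest := (PySem.List.pyRange 0 (list.length : Int) 1).foldl
      (fun sm i => if PySem.List.pyGetD list i 0 < sm then PySem.List.pyGetD list i 0 else sm) h
    rotateLoopA list.length smallest list

-- ===== PORT B =====
def rotate_smallest_alt (list : List Int) : List Int :=
  match PySem.List.min? list (fun x => x) with
  | none => []     -- ValueError (min of empty sequence); excluded by Pre_
  | some m =>
    match PySem.List.index? list m with
    | none => []   -- unreachable: the minimum is a member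
    | some i =>
      PySem.List.slice list (some (i : Int)) none ++ PySem.List.slice list none (some (i : Int))

-- ===== PRECONDITION & SPEC =====
-- Pre_ excludes exactly the empty list, on which A raises IndexError (list[0]).
def Pre_rotate_smallest (list : List Int) : Prop := list ≠ []
instance (list : List Int) : Decidable (Pre_rotate_smallest list) := by
  unfold Pre_rotate_smallest; infer_instance
def pvWitness_rotate_smallest : List Int := [3, 1, 2]

def Spec_rotate_smallest (list : List Int) (out : List Int) : Prop := out = rotate_smallest_alt list
instance (list : List Int) (out : List Int) : Decidable (Spec_rotate_smallest list out) := by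
  unfold Spec_rotate_smallest; infer_instance

-- ===== CLAIM (what is proved, stated in full; the proofs are below) =====
def Claim_equal_rotate_smallest : Prop := ∀ (list : List Int), Dom_rotate_smallest list → Pre_rotate_smallest list → Spec_rotate_smallest list (rotate_smallest list)

-- ===== LEMMAS AND PROOFS =====

-- the inner shifting loop, after k steps, has moved elements 1..k one slot left
theorem foldShift_eq (l : List Int) (k : Nat) (hk : k + 1 ≤ l.length) :
    (List.range k).foldl (fun acc s => acc.set s (acc.getD (s + 1) 0)) l
      = l.tail.take k ++ l.drop k := by
  induction k with
  | zero => simp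
  | succ k ih =>
    rw [List.range_succ, List.foldl_append, ih (by omega)]
    simp only [List.foldl_cons, List.foldl_nil]
    have hlen : (l.tail.take k).length = k := by
      simp only [List.length_take, List.length_tail]; omega
    have hdrop : l.drop k = l[k]'(by omega) :: l.drop (k + 1) :=
      List.drop_eq_getElem_cons (by omega)
    have hdrop1 : l.drop (k + 1) = l[k + 1]'(by omega) :: l.drop (k + 2) :=
      List.drop_eq_getElem_cons (by omega)
    have hget : (l.tail.take k ++ l.drop k).getD (k + 1) 0 = l[k + 1]'(by omega) := by
      rw [List.getD_append_right _ _ _ _ (by omega), hlen]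
      have : k + 1 - k = 1 := by omega
      rw [this, hdrop, hdrop1]
      simp [List.getD, List.getElem?_eq_getElem (show k + 1 < l.length by omega)]
    rw [hget, List.set_append]
    rw [hlen]
    simp only [lt_irrefl, if_false, Nat.sub_self]
    rw [hdrop, List.set_cons_zero]
    have htake : l.tail.take (k + 1) = l.tail.take k ++ [l[k + 1]'(by omega)] := by
      rw [List.take_add_one]
      congr 1
      rw [List.getElem?_eq_getElem (by simp [List.length_tail]; omega)]
      simp [List.getElem_tail]
    rw [htake]
    simp

theorem shiftA_eq (x : Int) (t : List Int) : shiftA (x :: t) = t ++ [x] := by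
  unfold shiftA
  simp only [PySem.List.pyGet?, PySem.List.pyIdx?]
  norm_num
  rw [PySem.List.pyRange_zero_nat, List.foldl_map]
  have hfun : (fun (acc : List Int) (s : Nat) =>
      PySem.List.pySetD acc (s : Int) (PySem.List.pyGetD acc ((s : Int) + 1) 0))
      = fun acc s => acc.set s (acc.getD (s + 1) 0) := by
    funext acc s
    have : ((s : Int) + 1) = ((s + 1 : Nat) : Int) := by push_cast; ring
    rw [this, PySem.List.pySetD_natCast, PySem.List.pyGetD_natCast]
  rw [hfun, foldShift_eq (x :: t) t.length (by simp)]
  simp only [List.tail_cons, List.take_length]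
  rcases List.length_eq_one_iff.mp (show ((x :: t).drop t.length).length = 1 by simp) with ⟨e, he⟩
  rw [he, List.set_append]
  simp

theorem rotateLoopA_eq (m : Int) :
    ∀ (i fuel : Nat) (l : List Int), i < fuel → i < l.length → l.getD i 0 = m →
      (∀ j, j < i → l.getD j 0 ≠ m) →
      rotateLoopA fuel m l = l.drop i ++ l.take i := by
  intro i
  induction i with
  | zero =>
    intro fuel l hif hil him _
    cases fuel with
    | zero => omega
    | succ f =>
      cases l with
      | nil => simp at hil
      | cons x t =>
        have hx : x = m := by simpa [List.getD] using him
        simp [rotateLoopA, PySem.List.pyGet?, PySem.List.pyIdx?, hx]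
  | succ i ih =>
    intro fuel l hif hil him hprev
    cases fuel with
    | zero => omega
    | succ f =>
      cases l with
      | nil => simp at hil
      | cons x t =>
        have hx : x ≠ m := by
          have := hprev 0 (by omega)
          simpa [List.getD] using this
        have hcond : PySem.List.pyGet? (x :: t) 0 ≠ some m := by
          simp [PySem.List.pyGet?, PySem.List.pyIdx?, hx]
        rw [rotateLoopA, if_neg hcond, shiftA_eq]
        have hil' : i < t.length := by simpa using hil
        rw [ih f (t ++ [x]) (by omega) (by simp; omega)
          (by rw [List.getD_append _ _ _ _ (by omega)]; simpa [List.getD] using him)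
          (by intro j hj
              rw [List.getD_append _ _ _ _ (by omega)]
              have := hprev (j + 1) (by omega)
              simpa [List.getD] using this)]
        rw [List.drop_append_of_le_length (by omega),
            List.take_append_of_le_length (by omega)]
        simp

-- ===== VERDICT (by name: the statement is the Claim_ definition above) =====
theorem rotate_smallest_spec : Claim_equal_rotate_smallest := by
  intro l _ hpre
  show rotate_smallest l = rotate_smallest_alt l
  cases l with
  | nil => exact absurd rfl hpre
  | cons x t =>
    have hget0 : PySem.List.pyGet? (x :: t) 0 = some x := by
      simp [PySem.List.pyGet?, PySem.List.pyIdx?]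
    -- A's first loop computes the running minimum of the whole list
    have hf : (fun (a b : Int) => if b < a then b else a) = fun a b => min a b := by
      funext a b
      simp only [min_def]
      split_ifs <;> omega
    have hsm : (PySem.List.pyRange 0 ((x :: t).length : Int) 1).foldl
        (fun sm i => if PySem.List.pyGetD (x :: t) i 0 < sm then PySem.List.pyGetD (x :: t) i 0 else sm) x
        = t.foldl min x := by
      have h1 := PySem.List.foldl_pyRange_zero_pyGetD' (x :: t) 0
        (fun a b => if b < a then b else a) x
      have h2 : (x :: t).foldl (fun a b => if b < a then b else a) x = t.foldl min x := by
        rw [hf]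
        simp [List.foldl_cons]
      exact h1.trans h2
    have hmin : PySem.List.min? (x :: t) (fun y => y) = some (t.foldl min x) :=
      PySem.List.min?_id_cons x t
    set m := t.foldl min x with hm
    have hmem : m ∈ x :: t := PySem.List.min?_mem hmin
    have hidx : ∃ i, PySem.List.index? (x :: t) m = some i := by
      have := (PySem.List.index?_isSome_iff (x :: t) m).mpr hmem
      exact Option.isSome_iff_exists.mp this
    rcases hidx with ⟨i, hi⟩
    rcases PySem.List.getElem_of_index?_eq_some hi with ⟨hk, hval, hprev⟩
    have hA : rotate_smallest (x :: t) = (x :: t).drop i ++ (x :: t).take i := by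
      unfold rotate_smallest
      rw [hget0]
      simp only [hsm]
      exact rotateLoopA_eq m i (x :: t).length (x :: t) hk hk
        (by rw [List.getD_eq_getElem _ _ hk]; exact hval)
        (fun j hj => by
          rw [List.getD_eq_getElem _ _ (by omega)]
          exact hprev j hj)
    have hB : rotate_smallest_alt (x :: t) = (x :: t).drop i ++ (x :: t).take i := by
      unfold rotate_smallest_alt
      rw [hmin]
      simp only [hi, PySem.List.slice_from_natCast, PySem.List.slice_to_natCast]
    rw [hA, hB]
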